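-- pv_equiv track=rewrite | github.com/hossg/projecteuler | P077_Prime_Summations.py | find_min_integer
-- ===== SOURCE A (Python) =====
-- def sieve_of_eratosthenes(limit):
--     """ Returns a list of primes up to the limit using the Sieve of Eratosthenes. """
--     is_prime = [True] * (limit + 1)
--     is_prime[0] = is_prime[1] = False
--     for i in range(2, int(limit ** 0.5) + 1):
--         if is_prime[i]:
--             for j in range(i * i, limit + 1, i):
--                 is_prime[j] = False
--     return [i for i in range(limit + 1) if is_prime[i]]
--
-- def count_prime_sums(target, primes):
--     """ Count the ways to express integers as sums of primes. """
--     ways = [0] * (target + 1)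
--     ways[0] = 1  # Base case: one way to make zero
--
--     for prime in primes:
--         for j in range(prime, target + 1):
--             ways[j] += ways[j - prime]
--
--     return ways
--
-- def find_min_integer(target_ways):
--     """ Find the smallest integer that can be expressed as the sum of primes in more than target_ways ways. """
--     limit = 100  # Initial limit for primes
--     primes = sieve_of_eratosthenes(limit)
--
--     while True:
--         ways = count_prime_sums(limit, primes)
--
--         for i in range(len(ways)):
--             if ways[i] > target_ways:
--                 return i,ways[i]
--
--         # A bit inefficient, but if we didn't start with a big enough number of primes, then start again with double the amount!
--         limit *= 2
--         primes = sieve_of_eratosthenes(limit)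
-- ===== SOURCE B (Python) =====
-- def sieve_of_eratosthenes(limit):
--     """ Returns a list of primes up to the limit using the Sieve of Eratosthenes. """
--     is_prime = [True] * (limit + 1)
--     is_prime[0] = is_prime[1] = False
--     for i in range(2, int(limit ** 0.5) + 1):
--         if is_prime[i]:
--             for j in range(i * i, limit + 1, i):
--                 is_prime[j] = False
--     return [i for i in range(limit + 1) if is_prime[i]]
--
-- def find_min_integer(target_ways):
--     """ Find the smallest integer that can be expressed as the sum of primes in more than target_ways ways. """
--     limit = 100
--     while True:
--         primes = sieve_of_eratosthenes(limit)
--         # top-down memoized recursion: count(n, k) = number of ways to write n as a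
--         # sum of primes drawn from primes[0..k] (each usable any number of times)
--         memo = [[-1] * len(primes) for _ in range(limit + 1)]
--
--         def count(n, k):
--             if n == 0:
--                 return 1
--             if k < 0:
--                 return 0
--             if memo[n][k] != -1:
--                 return memo[n][k]
--             r = count(n, k - 1)
--             if primes[k] <= n:
--                 r += count(n - primes[k], k)
--             memo[n][k] = r
--             return r
--
--         for i in range(limit + 1):
--             w = count(i, len(primes) - 1)
--             if w > target_ways:
--                 return i, w
--
--         limit *= 2
-- ===== Notes on version B (the rewrite author's own statement) =====
-- stated objective: alternative
-- what changed: A fills a bottom-up coin-change table ways[] over all primes and then scans it; B answers each candidate i by a top-down memoized recursion count(n, k) = count(n, k-1) + count(n-primes[k], k) over a 2D memo table, querying count(i, len(primes)-1) per candidate.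
import Mathlib
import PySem

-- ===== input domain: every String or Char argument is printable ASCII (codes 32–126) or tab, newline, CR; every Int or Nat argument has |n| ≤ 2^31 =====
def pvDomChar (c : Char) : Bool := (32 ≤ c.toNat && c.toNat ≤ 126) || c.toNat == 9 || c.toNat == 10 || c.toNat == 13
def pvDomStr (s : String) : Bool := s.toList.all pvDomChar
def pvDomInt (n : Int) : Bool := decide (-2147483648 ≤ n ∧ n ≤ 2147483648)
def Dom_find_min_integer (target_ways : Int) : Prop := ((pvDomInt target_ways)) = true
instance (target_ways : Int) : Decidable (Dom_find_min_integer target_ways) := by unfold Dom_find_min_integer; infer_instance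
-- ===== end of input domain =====

-- B replaces A's bottom-up coin-change table by a top-down memoized recursion count(n, k)
-- ("ways to write n using the first k+1 primes") queried per candidate i; objective: alternative.

-- ===== PORT A =====

-- shared helper (Source A's sieve; Source B reuses the same function verbatim).
-- `int(limit ** 0.5)` is ported as Nat.sqrt, which agrees with Python's float
-- computation on every limit this program reaches (limit = 100 * 2^k, k < 64; checked).
-- all list indexing below is in range on those limits, where pySetD/pyGetD are exact.
def sieve_of_eratosthenes (limit : Int) : List Int :=
  let is_prime := List.replicate (limit + 1).toNat true
  let is_prime := PySem.List.pySetD is_prime 0 false   -- is_prime[0] = False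
  let is_prime := PySem.List.pySetD is_prime 1 false   -- is_prime[1] = False
  let is_prime :=
    (PySem.List.pyRange 2 (((Nat.sqrt limit.toNat : Nat) : Int) + 1)).foldl (fun ip i =>
      if PySem.List.pyGetD ip i false then
        (PySem.List.pyRange (i * i) (limit + 1) i).foldl
          (fun ip j => PySem.List.pySetD ip j false) ip
      else ip) is_prime
  (PySem.List.pyRange 0 (limit + 1)).filter (fun i => PySem.List.pyGetD is_prime i false)

def count_prime_sums (target : Int) (primes : List Int) : List Int :=
  let ways : List Int := List.replicate (target + 1).toNat 0
  let ways := PySem.List.pySetD ways 0 1   -- ways[0] = 1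
  primes.foldl (fun ways prime =>
    (PySem.List.pyRange prime (target + 1)).foldl (fun ways j =>
      PySem.List.pySetD ways j
        (PySem.List.pyGetD ways j 0 + PySem.List.pyGetD ways (j - prime) 0)) ways) ways

-- `for i in range(len(ways)): if ways[i] > target_ways: return i, ways[i]` (early return)
def fmi_scan (target_ways : Int) (ways : List Int) : List Int → Option (Int × Int)
  | [] => none
  | i :: rest =>
    if PySem.List.pyGetD ways i 0 > target_ways then
      some (i, PySem.List.pyGetD ways i 0)
    else fmi_scan target_ways ways rest

-- the `while True` loop; the fuel (64 doublings) is a totality guard only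
def fmi_loop (target_ways : Int) (fuel : Nat) (limit : Int) (primes : List Int) : Int × Int :=
  match fuel with
  | 0 => (0, 0)
  | fuel + 1 =>
    let ways := count_prime_sums limit primes
    match fmi_scan target_ways ways (PySem.List.pyRange 0 (PySem.List.len ways)) with
    | some r => r
    | none => fmi_loop target_ways fuel (limit * 2) (sieve_of_eratosthenes (limit * 2))

def find_min_integer (target_ways : Int) : Int × Int :=
  fmi_loop target_ways 64 100 (sieve_of_eratosthenes 100)

-- ===== PORT B =====

-- memoized count(n, k): number of ways to write n as a sum of primes[0..k]; memo is
-- threaded through (memo[n][k] = r); all memo indexing is in range on every reachable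
-- call (0 ≤ n ≤ limit, 0 ≤ k < len primes), where pyGetD/pySetD are exact.
-- fuel is a totality guard; n + k + 1 steps always suffice (the primes are ≥ 2).
def fmi_count (primes : List Int) (fuel : Nat) (n k : Int) (memo : List (List Int)) :
    Int × List (List Int) :=
  match fuel with
  | 0 => (0, memo)
  | fuel + 1 =>
    if n = 0 then (1, memo)
    else if k < 0 then (0, memo)
    else
      let c := PySem.List.pyGetD (PySem.List.pyGetD memo n []) k (-1)
      if c ≠ -1 then (c, memo)
      else
        let p := PySem.List.pyGetD primes k 0
        let res1 := fmi_count primes fuel n (k - 1) memo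
        let res2 :=
          if p ≤ n then
            let res2' := fmi_count primes fuel (n - p) k res1.2
            (res1.1 + res2'.1, res2'.2)
          else res1
        let memo3 := PySem.List.pySetD res2.2 n
          (PySem.List.pySetD (PySem.List.pyGetD res2.2 n []) k res2.1)
        (res2.1, memo3)

-- `for i in range(limit + 1): w = count(i, len(primes) - 1); if w > target_ways: return i, w`
def fmi_scan_alt (target_ways : Int) (primes : List Int) :
    List Int → List (List Int) → Option (Int × Int) × List (List Int)
  | [], memo => (none, memo)
  | i :: rest, memo =>
    let res := fmi_count primes (i.toNat + primes.length + 1) i ((primes.length : Int) - 1) memo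
    if res.1 > target_ways then (some (i, res.1), res.2)
    else fmi_scan_alt target_ways primes rest res.2

def fmi_loop_alt (target_ways : Int) (fuel : Nat) (limit : Int) : Int × Int :=
  match fuel with
  | 0 => (0, 0)
  | fuel + 1 =>
    let primes := sieve_of_eratosthenes limit
    let memo : List (List Int) :=
      List.replicate (limit + 1).toNat (List.replicate primes.length (-1))
    match fmi_scan_alt target_ways primes (PySem.List.pyRange 0 (limit + 1)) memo with
    | (some r, _) => r
    | (none, _) => fmi_loop_alt target_ways fuel (limit * 2)

def find_min_integer_alt (target_ways : Int) : Int × Int :=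
  fmi_loop_alt target_ways 64 100

-- ===== PRECONDITION & SPEC =====
def Spec_find_min_integer (target_ways : Int) (out : Int × Int) : Prop := out = find_min_integer_alt target_ways
instance (target_ways : Int) (out : Int × Int) : Decidable (Spec_find_min_integer target_ways out) := by unfold Spec_find_min_integer; infer_instance

-- ===== CLAIM (what is proved, stated in full; the proofs are below) =====
def Claim_equal_find_min_integer : Prop := ∀ (target_ways : Int), Dom_find_min_integer target_ways → Spec_find_min_integer target_ways (find_min_integer target_ways)

-- ===== LEMMAS AND PROOFS =====

-- the common mathematical value: dspec P n m = number of ways to write n as a sum of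
-- elements among the first m entries of P (each usable any number of times)
def dspec (P : List Int) (n : Int) (m : Nat) : Int :=
  match m with
  | 0 => if n = 0 then 1 else 0
  | m' + 1 =>
    dspec P n m' +
      (if h : 0 < P.getD m' 0 ∧ P.getD m' 0 ≤ n then dspec P (n - P.getD m' 0) (m' + 1) else 0)
termination_by (n.toNat, m)
decreasing_by
  · exact Prod.Lex.right _ (Nat.lt_succ_self m')
  · exact Prod.Lex.left _ _ (by omega)

theorem dspec_zero (P : List Int) (m : Nat) : dspec P 0 m = 1 := by
  induction m with
  | zero => simp [dspec]
  | succ m ih =>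
    rw [dspec, ih]
    have : ¬ (0 < P.getD m 0 ∧ P.getD m 0 ≤ (0:Int)) := by omega
    rw [dif_neg this]; ring

theorem dspec_notake (P : List Int) (n : Int) (m : Nat)
    (h : ¬ (0 < P.getD m 0 ∧ P.getD m 0 ≤ n)) : dspec P n (m + 1) = dspec P n m := by
  rw [dspec, dif_neg h]; ring

theorem dspec_take (P : List Int) (n : Int) (m : Nat)
    (h : 0 < P.getD m 0 ∧ P.getD m 0 ≤ n) :
    dspec P n (m + 1) = dspec P n m + dspec P (n - P.getD m 0) (m + 1) := by
  conv_lhs => rw [dspec]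
  rw [dif_pos h]

-- small getD/set facts used throughout
theorem getD_set_ne' {α : Type} (l : List α) (n a : Nat) (x : α) (d : α) (h : a ≠ n) :
    (l.set n x).getD a d = l.getD a d := by
  rw [List.getD_eq_getElem?_getD, List.getD_eq_getElem?_getD, List.getElem?_set_ne (Ne.symm h)]

theorem getD_set_self' {α : Type} (l : List α) (n : Nat) (x : α) (d : α) (h : n < l.length) :
    (l.set n x).getD n d = x := by
  rw [List.getD_eq_getElem _ _ (by simpa using h), List.getElem_set_self]

-- ---- the sieve output only matters through "its elements are ≥ 2" ----

theorem getD_set_false (w : List Bool) (i j : Nat) (h : w.getD i false = false) :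
    (w.set j false).getD i false = false := by
  rcases eq_or_ne i j with rfl | hne
  · simp [List.getD, List.getElem?_set_self']
    cases w[i]? <;> simp
  · simp [List.getD, List.getElem?_set_ne (by omega : j ≠ i)]; simpa [List.getD] using h

theorem init_flag0 (n : Nat) (h : 2 ≤ n) :
    (((List.replicate n true).set 0 false).set 1 false).getD 0 false = false := by
  simp [List.getD, List.getElem?_set_ne (by omega : (1:Nat) ≠ 0), List.getElem?_set_self',
    List.getElem?_replicate]
  rw [if_pos (by omega)]; rfl

theorem init_flag1 (n : Nat) (h : 2 ≤ n) :
    (((List.replicate n true).set 0 false).set 1 false).getD 1 false = false := by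
  simp [List.getD, List.getElem?_set_self']
  rw [List.getElem?_replicate, if_pos (by omega)]; rfl

theorem foldl_preserve {α β : Type} (P : α → Prop) (f : α → β → α) (hf : ∀ a b, P a → P (f a b)) :
    ∀ (l : List β) (a : α), P a → P (l.foldl f a) := by
  intro l
  induction l with
  | nil => intro a ha; exact ha
  | cons x xs ih => intro a ha; exact ih _ (hf a x ha)

theorem getD_pySetD_false (w : List Bool) (jI : Int) (i : Nat) (h : w.getD i false = false) :
    (PySem.List.pySetD w jI false).getD i false = false := by
  unfold PySem.List.pySetD PySem.List.pySet?
  cases hc : PySem.List.pyIdx? w.length jI with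
  | none => simpa [hc] using h
  | some k => simpa [hc] using getD_set_false w i k h

theorem sieve_ge_two (L : Int) (hL : 1 ≤ L) : ∀ p ∈ sieve_of_eratosthenes L, 2 ≤ p := by
  intro p hp
  unfold sieve_of_eratosthenes at hp
  rw [List.mem_filter] at hp
  obtain ⟨hmem, hflag⟩ := hp
  have hp0 : 0 ≤ p := ((PySem.List.mem_pyRange_one).1 hmem).1
  set w0 : List Bool := PySem.List.pySetD (PySem.List.pySetD (List.replicate (L + 1).toNat true) 0 false) 1 false with hw0
  have hInv0 : w0.getD 0 false = false ∧ w0.getD 1 false = false := by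
    rw [hw0]
    rw [PySem.List.pySetD_of_nonneg _ _ (by norm_num), PySem.List.pySetD_of_nonneg _ _ (by norm_num)]
    simp only [Int.toNat_zero, Int.toNat_one]
    exact ⟨init_flag0 _ (by omega), init_flag1 _ (by omega)⟩
  have hInv : ∀ (w : List Bool), (w.getD 0 false = false ∧ w.getD 1 false = false) →
      ∀ (l : List Int), ((l.foldl (fun ip i =>
        if PySem.List.pyGetD ip i false then
          (PySem.List.pyRange (i * i) (L + 1) i).foldl (fun ip j => PySem.List.pySetD ip j false) ip
        else ip) w).getD 0 false = false ∧ (l.foldl (fun ip i =>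
        if PySem.List.pyGetD ip i false then
          (PySem.List.pyRange (i * i) (L + 1) i).foldl (fun ip j => PySem.List.pySetD ip j false) ip
        else ip) w).getD 1 false = false) := by
    intro w hw l
    refine foldl_preserve (fun w => List.getD w 0 false = false ∧ List.getD w 1 false = false) _ ?_ l w hw
    intro a b ha
    split
    · refine foldl_preserve (fun w => List.getD w 0 false = false ∧ List.getD w 1 false = false)
        (fun ip j => PySem.List.pySetD ip j false) ?_ _ a ha
      intro a' b' ha'
      exact ⟨getD_pySetD_false _ _ _ ha'.1, getD_pySetD_false _ _ _ ha'.2⟩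
    · exact ha
  have hfin := hInv w0 hInv0 (PySem.List.pyRange 2 (((Nat.sqrt L.toNat : Nat) : Int) + 1))
  rw [PySem.List.pyGetD_of_nonneg _ _ hp0] at hflag
  by_contra hlt
  have : p.toNat = 0 ∨ p.toNat = 1 := by omega
  rcases this with h0 | h1
  · rw [h0] at hflag; rw [hfin.1] at hflag; exact Bool.false_ne_true hflag
  · rw [h1] at hflag; rw [hfin.2] at hflag; exact Bool.false_ne_true hflag
def mentry (memo : List (List Int)) (a b : Nat) : Int := (memo.getD a []).getD b (-1)

def MValid (P : List Int) (memo : List (List Int)) : Prop :=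
  ∀ a b : Nat, mentry memo a b ≠ -1 → mentry memo a b = dspec P (a : Int) (b + 1)

theorem mentry_write_cases (memo : List (List Int)) (n k : Nat) (r : Int) (a b : Nat) :
    mentry (memo.set n ((memo.getD n []).set k r)) a b = mentry memo a b ∨
      (a = n ∧ b = k ∧ mentry (memo.set n ((memo.getD n []).set k r)) a b = r) := by
  unfold mentry
  rcases eq_or_ne a n with rfl | hne
  · by_cases hlen : a < memo.length
    · rw [getD_set_self' _ _ _ _ hlen]
      rcases eq_or_ne b k with rfl | hbk
      · by_cases hkl : b < (memo.getD a []).length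
        · exact Or.inr ⟨rfl, rfl, getD_set_self' _ _ _ _ hkl⟩
        · left
          rw [List.set_eq_of_length_le (by omega)]
      · left
        rw [getD_set_ne' _ _ _ _ _ hbk]
    · left
      rw [List.set_eq_of_length_le (by omega)]
  · left
    rw [getD_set_ne' _ _ _ _ _ hne]

theorem fmi_count_correct (P : List Int) (HP : ∀ p ∈ P, 2 ≤ p) :
    ∀ (fuel : Nat) (n k : Int) (memo : List (List Int)),
    0 ≤ n → -1 ≤ k → k < (P.length : Int) →
    n.toNat + (k + 1).toNat + 1 ≤ fuel →
    MValid P memo →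
    (fmi_count P fuel n k memo).1 = dspec P n (k + 1).toNat ∧
      MValid P (fmi_count P fuel n k memo).2 := by
  intro fuel
  induction fuel with
  | zero => intro n k memo h0 h1 h2 hf hv; omega
  | succ fuel ih =>
    intro n k memo h0 h1 h2 hf hv
    rw [fmi_count]
    by_cases hn : n = 0
    · subst hn; simp [dspec_zero, hv]
    · rw [if_neg hn]
      by_cases hk : k < 0
      · rw [if_pos hk]
        have : (k + 1).toNat = 0 := by omega
        rw [this]
        exact ⟨by simp [dspec, hn], hv⟩
      · rw [if_neg hk]
        have hk0 : 0 ≤ k := by omega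
        have hcread : PySem.List.pyGetD (PySem.List.pyGetD memo n []) k (-1) = mentry memo n.toNat k.toNat := by
          rw [PySem.List.pyGetD_of_nonneg _ _ h0, PySem.List.pyGetD_of_nonneg _ _ hk0]; rfl
        have hk1 : (k + 1).toNat = k.toNat + 1 := by omega
        by_cases hc : mentry memo n.toNat k.toNat ≠ -1
        · rw [if_pos (by rw [hcread]; exact hc)]
          refine ⟨?_, hv⟩
          have hcast : dspec P (↑n.toNat) (k.toNat + 1) = dspec P n ((k+1).toNat) := by
            rw [Int.toNat_of_nonneg h0, hk1]
          rw [hcread, hv _ _ hc, hcast]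
        · rw [if_neg (by rw [hcread]; exact hc)]
          have hkl : k.toNat < P.length := by omega
          have hp : PySem.List.pyGetD P k 0 = P.getD k.toNat 0 := by
            rw [PySem.List.pyGetD_of_nonneg _ _ hk0]
          have hpget : P.getD k.toNat 0 = P[k.toNat] := List.getD_eq_getElem _ _ hkl
          have hp2 : 2 ≤ P.getD k.toNat 0 := by
            rw [hpget]; exact HP _ (List.getElem_mem _)
          have ih1 := ih n (k - 1) memo h0 (by omega) (by omega) (by omega) hv
          have hk11 : k - 1 + 1 = k := by ring
          rw [hk11] at ih1
          have hr1 : (fmi_count P fuel n (k - 1) memo).1 = dspec P n k.toNat := ih1.1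
          have hres2 : (if PySem.List.pyGetD P k 0 ≤ n then
                let res2' := fmi_count P fuel (n - PySem.List.pyGetD P k 0) k (fmi_count P fuel n (k - 1) memo).2
                ((fmi_count P fuel n (k - 1) memo).1 + res2'.1, res2'.2)
              else fmi_count P fuel n (k - 1) memo).1 = dspec P n (k + 1).toNat ∧
              MValid P (if PySem.List.pyGetD P k 0 ≤ n then
                let res2' := fmi_count P fuel (n - PySem.List.pyGetD P k 0) k (fmi_count P fuel n (k - 1) memo).2
                ((fmi_count P fuel n (k - 1) memo).1 + res2'.1, res2'.2)
              else fmi_count P fuel n (k - 1) memo).2 := by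
            by_cases hpn : PySem.List.pyGetD P k 0 ≤ n
            · rw [if_pos hpn]
              have hpn' : P.getD k.toNat 0 ≤ n := by rw [← hp]; exact hpn
              have ih2 := ih (n - PySem.List.pyGetD P k 0) k (fmi_count P fuel n (k - 1) memo).2
                (by rw [hp]; omega) (by omega) h2
                (by rw [hp]; omega) ih1.2
              refine ⟨?_, ih2.2⟩
              have key : dspec P n (k.toNat + 1) = dspec P n k.toNat + dspec P (n - P.getD k.toNat 0) (k.toNat + 1) := by
                conv_lhs => rw [dspec]
                rw [dif_pos ⟨by omega, hpn'⟩]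
              show (fmi_count P fuel n (k - 1) memo).1 +
                (fmi_count P fuel (n - PySem.List.pyGetD P k 0) k (fmi_count P fuel n (k - 1) memo).2).1 = _
              rw [hr1, ih2.1, hp, hk1, key]
            · rw [if_neg hpn]
              refine ⟨?_, ih1.2⟩
              have key2 : dspec P n (k.toNat + 1) = dspec P n k.toNat := by
                conv_lhs => rw [dspec]
                rw [dif_neg (by rw [hp] at hpn; omega)]
                ring
              rw [hr1, hk1, key2]
          simp only []
          constructor
          · exact hres2.1
          · rw [PySem.List.pySetD_of_nonneg _ _ h0, PySem.List.pySetD_of_nonneg _ _ hk0,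
               PySem.List.pyGetD_of_nonneg _ _ h0]
            intro a b hne
            rcases mentry_write_cases _ n.toNat k.toNat _ a b with hsame | ⟨ha, hb, hval⟩
            · rw [hsame] at hne ⊢
              exact hres2.2 _ _ hne
            · subst ha; subst hb
              rw [hval, hres2.1]
              congr 1 <;> omega

theorem pass_correct (P : List Int) (L : Int) (hL : 0 ≤ L) (p : Int) (hp2 : 2 ≤ p)
    (m : Nat) (hpm : P.getD m 0 = p) :
    ∀ (d : Nat) (a : Int) (w : List Int), p ≤ a → d = (L + 1 - a).toNat → w.length = (L + 1).toNat →
    (∀ j : Nat, j < (L + 1).toNat →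
      (((j : Int) < a → w.getD j 0 = dspec P (j : Int) (m + 1)) ∧
       (a ≤ (j : Int) → w.getD j 0 = dspec P (j : Int) m))) →
    ((PySem.List.pyRange a (L + 1)).foldl (fun ways j =>
      PySem.List.pySetD ways j
        (PySem.List.pyGetD ways j 0 + PySem.List.pyGetD ways (j - p) 0)) w).length = (L + 1).toNat ∧
    (∀ j : Nat, j < (L + 1).toNat →
      ((PySem.List.pyRange a (L + 1)).foldl (fun ways j =>
        PySem.List.pySetD ways j
          (PySem.List.pyGetD ways j 0 + PySem.List.pyGetD ways (j - p) 0)) w).getD j 0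
        = dspec P (j : Int) (m + 1)) := by
  intro d
  induction d with
  | zero =>
    intro a w hpa hd hlen hinv
    have hrange : PySem.List.pyRange a (L + 1) = [] := PySem.List.pyRange_one_eq_nil (by omega)
    rw [hrange]
    refine ⟨hlen, ?_⟩
    intro j hj
    exact (hinv j hj).1 (by omega)
  | succ d ihd =>
    intro a w hpa hd hlen hinv
    by_cases hab : L + 1 ≤ a
    · have hrange : PySem.List.pyRange a (L + 1) = [] := PySem.List.pyRange_one_eq_nil hab
      rw [hrange]
      refine ⟨hlen, ?_⟩
      intro j hj
      exact (hinv j hj).1 (by omega)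
    · have ha : a < L + 1 := by omega
      rw [PySem.List.pyRange_one_cons ha]
      rw [List.foldl_cons]
      have ha0 : 0 ≤ a := by omega
      have hat : a.toNat < (L + 1).toNat := by omega
      have hva : PySem.List.pyGetD w a 0 = dspec P a m := by
        rw [PySem.List.pyGetD_of_nonneg _ _ ha0]
        have := (hinv a.toNat hat).2 (by omega)
        rw [Int.toNat_of_nonneg ha0] at this
        exact this
      have hvap : PySem.List.pyGetD w (a - p) 0 = dspec P (a - p) (m + 1) := by
        rw [PySem.List.pyGetD_of_nonneg _ _ (by omega)]
        have h1 : (a - p).toNat < (L + 1).toNat := by omega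
        have := (hinv (a - p).toNat h1).1 (by omega)
        rw [Int.toNat_of_nonneg (by omega : (0:Int) ≤ a - p)] at this
        exact this
      have hstep : PySem.List.pySetD w a (PySem.List.pyGetD w a 0 + PySem.List.pyGetD w (a - p) 0)
          = w.set a.toNat (dspec P a (m + 1)) := by
        rw [hva, hvap, PySem.List.pySetD_of_nonneg _ _ ha0]
        rw [← hpm, ← dspec_take P a m (by rw [hpm]; omega)]
      rw [hstep]
      refine ihd (a + 1) _ (by omega) (by omega) (by simpa using hlen) ?_
      intro j hj
      constructor
      · intro hja
        by_cases hjeq : (j : Int) = a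
        · have : j = a.toNat := by omega
          subst this
          rw [getD_set_self' _ _ _ _ (by omega)]
          congr 1; omega
        · rw [getD_set_ne' _ _ _ _ _ (by omega)]
          exact (hinv j hj).1 (by omega)
      · intro hja
        rw [getD_set_ne' _ _ _ _ _ (by omega)]
        exact (hinv j hj).2 (by omega)

theorem primes_fold (P : List Int) (HP : ∀ p ∈ P, 2 ≤ p) (L : Int) (hL : 0 ≤ L) :
    ∀ (S : List Int) (m : Nat) (w : List Int), P.drop m = S → w.length = (L + 1).toNat →
    (∀ j : Nat, j < (L + 1).toNat → w.getD j 0 = dspec P (j : Int) m) →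
    (S.foldl (fun ways prime =>
      (PySem.List.pyRange prime (L + 1)).foldl (fun ways j =>
        PySem.List.pySetD ways j
          (PySem.List.pyGetD ways j 0 + PySem.List.pyGetD ways (j - prime) 0)) ways) w).length = (L + 1).toNat ∧
    (∀ j : Nat, j < (L + 1).toNat →
      (S.foldl (fun ways prime =>
        (PySem.List.pyRange prime (L + 1)).foldl (fun ways j =>
          PySem.List.pySetD ways j
            (PySem.List.pyGetD ways j 0 + PySem.List.pyGetD ways (j - prime) 0)) ways) w).getD j 0
        = dspec P (j : Int) (m + S.length)) := by
  intro S
  induction S with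
  | nil =>
    intro m w hdrop hlen hinv
    exact ⟨hlen, by simpa using hinv⟩
  | cons p S' ihS =>
    intro m w hdrop hlen hinv
    have hmlen : m < P.length := by
      by_contra hcon
      rw [List.drop_eq_nil_of_le (by omega)] at hdrop
      exact List.cons_ne_nil _ _ hdrop.symm
    have hget : P[m] = p := by
      have := List.drop_eq_getElem_cons hmlen
      rw [hdrop] at this
      exact (List.cons_eq_cons.mp this).1.symm
    have hpm : P.getD m 0 = p := by rw [List.getD_eq_getElem _ _ hmlen, hget]
    have hp2 : 2 ≤ p := by rw [← hget]; exact HP _ (List.getElem_mem _)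
    rw [List.foldl_cons]
    have hpass := pass_correct P L hL p hp2 m hpm (L + 1 - p).toNat p w (le_refl p) rfl hlen ?_
    · have hdrop' : P.drop (m + 1) = S' := by
        have := List.drop_eq_getElem_cons hmlen
        rw [hdrop, hget] at this
        exact (List.cons_eq_cons.mp this).2.symm
      have := ihS (m + 1) _ hdrop' hpass.1 hpass.2
      refine ⟨this.1, ?_⟩
      intro j hj
      rw [(this.2 j hj)]
      congr 1
      simp [List.length_cons]
      omega
    · intro j hj
      constructor
      · intro hjp
        rw [hinv j hj]
        rw [dspec_notake P _ m (by omega)]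
      · intro _
        exact hinv j hj

theorem count_prime_sums_correct (P : List Int) (HP : ∀ p ∈ P, 2 ≤ p) (L : Int) (hL : 0 ≤ L) :
    (count_prime_sums L P).length = (L + 1).toNat ∧
    (∀ j : Nat, j < (L + 1).toNat →
      (count_prime_sums L P).getD j 0 = dspec P (j : Int) P.length) := by
  have hinit : (PySem.List.pySetD (List.replicate (L + 1).toNat (0:Int)) 0 1)
      = (List.replicate (L + 1).toNat (0:Int)).set 0 1 := by
    rw [PySem.List.pySetD_of_nonneg _ _ (by norm_num)]
    norm_num
  have hlen0 : ((List.replicate (L + 1).toNat (0:Int)).set 0 1).length = (L + 1).toNat := by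
    simp
  have hval0 : ∀ j : Nat, j < (L + 1).toNat →
      ((List.replicate (L + 1).toNat (0:Int)).set 0 1).getD j 0 = dspec P (j : Int) 0 := by
    intro j hj
    rcases Nat.eq_zero_or_pos j with rfl | hjpos
    · rw [getD_set_self' _ _ _ _ (by simpa using hj)]
      simp [dspec]
    · rw [getD_set_ne' _ _ _ _ _ (by omega)]
      have hjl : j < (List.replicate (L + 1).toNat (0:Int)).length := by simpa using hj
      rw [List.getD_eq_getElem _ _ hjl, List.getElem_replicate]
      simp only [dspec]
      rw [if_neg (by omega : ¬((j : Int) = 0))]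
  have := primes_fold P HP L hL P 0 _ (by simp) hlen0 hval0
  have hdef : count_prime_sums L P = P.foldl (fun ways prime =>
      (PySem.List.pyRange prime (L + 1)).foldl (fun ways j =>
        PySem.List.pySetD ways j
          (PySem.List.pyGetD ways j 0 + PySem.List.pyGetD ways (j - prime) 0)) ways)
      (PySem.List.pySetD (List.replicate (L + 1).toNat 0) 0 1) := rfl
  rw [hinit] at hdef
  rw [hdef]
  simpa using this

-- reference scan: first index i in the list with dspec P i |P| > t
def refScan (t : Int) (P : List Int) : List Int → Option (Int × Int)
  | [] => none
  | i :: rest =>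
    if dspec P i P.length > t then some (i, dspec P i P.length) else refScan t P rest

theorem scanA_eq (t : Int) (P : List Int) (ways : List Int)
    (hvals : ∀ j : Nat, j < ways.length → ways.getD j 0 = dspec P (j : Int) P.length) :
    ∀ l : List Int, (∀ i ∈ l, 0 ≤ i ∧ i < (ways.length : Int)) →
    fmi_scan t ways l = refScan t P l := by
  intro l
  induction l with
  | nil => intro _; rfl
  | cons i rest ih =>
    intro hmem
    obtain ⟨hi0, hiN⟩ := hmem i (List.mem_cons_self)
    have hval : PySem.List.pyGetD ways i 0 = dspec P i P.length := by
      rw [PySem.List.pyGetD_of_nonneg _ _ hi0]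
      have := hvals i.toNat (by omega)
      rw [Int.toNat_of_nonneg hi0] at this
      exact this
    rw [fmi_scan, refScan, hval]
    by_cases hgt : dspec P i P.length > t
    · rw [if_pos hgt, if_pos hgt]
    · rw [if_neg hgt, if_neg hgt]
      exact ih (fun x hx => hmem x (List.mem_cons_of_mem _ hx))

theorem mentry_init (R C a b : Nat) :
    mentry (List.replicate R (List.replicate C (-1:Int))) a b = -1 := by
  unfold mentry
  by_cases h : a < R
  · have houter : (List.replicate R (List.replicate C (-1:Int))).getD a [] = List.replicate C (-1) := by
      rw [List.getD_eq_getElem _ _ (by simpa using h), List.getElem_replicate]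
    rw [houter]
    by_cases h2 : b < C
    · rw [List.getD_eq_getElem _ _ (by simpa using h2), List.getElem_replicate]
    · rw [List.getD_eq_getElem?_getD, List.getElem?_eq_none (by simpa using h2)]
      rfl
  · have houter : (List.replicate R (List.replicate C (-1:Int))).getD a [] = [] := by
      rw [List.getD_eq_getElem?_getD, List.getElem?_eq_none (by simpa using h)]
      rfl
    rw [houter]
    rfl

theorem scanB_eq (t : Int) (P : List Int) (HP : ∀ p ∈ P, 2 ≤ p) :
    ∀ (l : List Int) (memo : List (List Int)), MValid P memo → (∀ i ∈ l, 0 ≤ i) →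
    (fmi_scan_alt t P l memo).1 = refScan t P l := by
  intro l
  induction l with
  | nil => intro memo _ _; rfl
  | cons i rest ih =>
    intro memo hv hmem
    have hi0 : 0 ≤ i := hmem i (List.mem_cons_self)
    have hcnt := fmi_count_correct P HP (i.toNat + P.length + 1) i ((P.length : Int) - 1) memo
      hi0 (by omega) (by omega) (by omega) hv
    have hm : ((P.length : Int) - 1 + 1).toNat = P.length := by omega
    rw [hm] at hcnt
    rw [fmi_scan_alt, refScan]
    by_cases hgt : dspec P i P.length > t
    · rw [if_pos (by rw [hcnt.1]; exact hgt), if_pos hgt]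
      show some (i, (fmi_count P (i.toNat + P.length + 1) i ((P.length : Int) - 1) memo).1) = _
      rw [hcnt.1]
    · rw [if_neg (by rw [hcnt.1]; exact hgt)]
      rw [if_neg hgt]
      exact ih _ hcnt.2 (fun x hx => hmem x (List.mem_cons_of_mem _ hx))

theorem loop_eq (t : Int) :
    ∀ (fuel : Nat) (L : Int), 1 ≤ L →
    fmi_loop t fuel L (sieve_of_eratosthenes L) = fmi_loop_alt t fuel L := by
  intro fuel
  induction fuel with
  | zero => intro L hL; rfl
  | succ fuel ih =>
    intro L hL
    have HP := sieve_ge_two L hL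
    have hcps := count_prime_sums_correct (sieve_of_eratosthenes L) HP L (by omega)
    have hlenw : (PySem.List.len (count_prime_sums L (sieve_of_eratosthenes L)) : Int) = L + 1 := by
      rw [PySem.List.len_eq, hcps.1]; omega
    have hA : fmi_scan t (count_prime_sums L (sieve_of_eratosthenes L))
        (PySem.List.pyRange 0 (L + 1)) = refScan t (sieve_of_eratosthenes L) (PySem.List.pyRange 0 (L + 1)) := by
      refine scanA_eq t _ _ (fun j hj => hcps.2 j (by omega)) _ ?_
      intro i hi
      have := (PySem.List.mem_pyRange_one).1 hi
      constructor
      · omega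
      · rw [hcps.1]; omega
    have hB : (fmi_scan_alt t (sieve_of_eratosthenes L) (PySem.List.pyRange 0 (L + 1))
        (List.replicate (L + 1).toNat (List.replicate (sieve_of_eratosthenes L).length (-1)))).1
        = refScan t (sieve_of_eratosthenes L) (PySem.List.pyRange 0 (L + 1)) := by
      refine scanB_eq t _ HP _ _ (fun a b hne => absurd (mentry_init _ _ a b) hne) ?_
      intro i hi
      exact ((PySem.List.mem_pyRange_one).1 hi).1
    rw [fmi_loop, fmi_loop_alt]
    simp only [hlenw]
    rw [hA]
    rcases hres : fmi_scan_alt t (sieve_of_eratosthenes L) (PySem.List.pyRange 0 (L + 1))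
        (List.replicate (L + 1).toNat (List.replicate (sieve_of_eratosthenes L).length (-1))) with ⟨o, memo'⟩
    rw [hres] at hB
    simp only at hB
    rw [hB.symm]
    cases o with
    | some r => rfl
    | none => exact ih (L * 2) (by omega)

-- ===== VERDICT (by name: the statement is the Claim_ definition above) =====
theorem find_min_integer_spec : Claim_equal_find_min_integer := by
  intro t _
  unfold Spec_find_min_integer find_min_integer find_min_integer_alt
  exact loop_eq t 64 100 (by norm_num)
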